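-- pv_equiv track=rewrite | github.com/Kidding0/1-ai-competitor-reporter | src/insights.py | rule_based_insights
-- ===== SOURCE A (Python) =====
-- from collections import Counter, defaultdict
--
-- def rule_based_insights(evs, top_n=5):
--     cnt = Counter([e["event"] for e in evs])
--     by_comp = defaultdict(list)
--     for e in evs:
--         by_comp[e["competitor"]].append(e)
--
--     insights = []
--
--     # 1) price drops spike
--     drop = sum(1 for e in evs if e["event"].startswith("PRICE_DOWN"))
--     if drop >= 3:
--         insights.append({
--             "lv": f"Tirgū novērots cenu kritumu vilnis ({drop} gadījumi) — iespējama akciju fāze vai krājumu optimizācija.",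
--             "ru": f"Наблюдается волна снижения цен ({drop} случаев) — возможно, началась акция или распродажа остатков.",
--             "action": "Pārskatīt cenas do 3–5 enkura SKU; pastiprināt komunikāciju par piegādes termiņiem."
--         })
--
--     # 2) new items
--     new_items = sum(1 for e in evs if e["event"]=="NEW_ITEM")
--     if new_items >= 3:
--         insights.append({
--             "lv": f"Konkurenti izlaiduši {new_items} jaunus SKU pēdējās 2 nedēļās.",
--             "ru": f"Конкуренты добавили {new_items} новых SKU за последние 2 недели.",
--             "action": "Pārvērtēt kategoriju lapas; sasva rēķinu ar pieprasītākajām specifikācijām."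
--         })
--
--     # 3) availability changes
--     avail_ch = sum(1 for e in evs if e["event"]=="AVAIL_CHANGE")
--     if avail_ch >= 3:
--         insights.append({
--             "lv": f"Biežas pieejamības izmaiņas ({avail_ch}) — loģistikas svārstības tirgū.",
--             "ru": f"Частые изменения наличия ({avail_ch}) — признак логистических колебаний на рынке.",
--             "action": "Komunicēt piegādes laiku; rezervēt krājumus enkura pozīcijām."
--         })
--
--     # 4) most active competitor
--     most = max(by_comp.items(), key=lambda kv: len(kv[1]))[0] if by_comp else None
--     if most:
--         insights.append({
--             "lv": f"Aktīvākais konkurents: {most} (vairāk izmaiņu nedēļā).",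
--             "ru": f"Самый активный конкурент: {most} (больше всего изменений за неделю).",
--             "action": "Sekot viņa kampaņām; salīdzināt cenu koridorus."
--         })
--
--     # ensure top_n
--     return insights[:top_n]
-- ===== SOURCE B (Python) =====
-- # Single pass over evs accumulating the three rule counters and a per-competitor
-- # count dict; the unused Counter of A is dropped. Same return value as A.
-- def rule_based_insights(evs, top_n=5):
--     drop = new_items = avail_ch = 0
--     comp_counts = {}
--     for e in evs:
--         ev = e["event"]
--         if ev.startswith("PRICE_DOWN"):
--             drop += 1
--         if ev == "NEW_ITEM":
--             new_items += 1
--         if ev == "AVAIL_CHANGE":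
--             avail_ch += 1
--         c = e["competitor"]
--         comp_counts[c] = comp_counts.get(c, 0) + 1
--
--     insights = []
--     if drop >= 3:
--         insights.append({
--             "lv": f"Tirgū novērots cenu kritumu vilnis ({drop} gadījumi) — iespējama akciju fāze vai krājumu optimizācija.",
--             "ru": f"Наблюдается волна снижения цен ({drop} случаев) — возможно, началась акция или распродажа остатков.",
--             "action": "Pārskatīt cenas do 3–5 enkura SKU; pastiprināt komunikāciju par piegādes termiņiem."
--         })
--     if new_items >= 3:
--         insights.append({
--             "lv": f"Konkurenti izlaiduši {new_items} jaunus SKU pēdējās 2 nedēļās.",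
--             "ru": f"Конкуренты добавили {new_items} новых SKU за последние 2 недели.",
--             "action": "Pārvērtēt kategoriju lapas; sasva rēķinu ar pieprasītākajām specifikācijām."
--         })
--     if avail_ch >= 3:
--         insights.append({
--             "lv": f"Biežas pieejamības izmaiņas ({avail_ch}) — loģistikas svārstības tirgū.",
--             "ru": f"Частые изменения наличия ({avail_ch}) — признак логистических колебаний на рынке.",
--             "action": "Komunicēt piegādes laiku; rezervēt krājumus enkura pozīcijām."
--         })
--     if comp_counts:
--         most, _ = max(comp_counts.items(), key=lambda kv: kv[1])
--         if most:
--             insights.append({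
--                 "lv": f"Aktīvākais konkurents: {most} (vairāk izmaiņu nedēļā).",
--                 "ru": f"Самый активный конкурент: {most} (больше всего изменений за неделю).",
--                 "action": "Sekot viņa kampaņām; salīdzināt cenu koridorus."
--             })
--     return insights[:top_n]
-- ===== Notes on version B (the rewrite author's own statement) =====
-- stated objective: simpler
-- what changed: B replaces A's four separate scans (an unused Counter, a defaultdict grouping full event lists per competitor, and three generator-sum passes) with one loop that accumulates three integer counters and a per-competitor count dict, taking the most-active competitor from the counts afterwards with max()'s first-maximal tie-break.
-- outside the precondition, e.g. on rule_based_insights([{'competitor': 'x'}], 5): A raises KeyError, B raises KeyError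
import Mathlib
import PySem

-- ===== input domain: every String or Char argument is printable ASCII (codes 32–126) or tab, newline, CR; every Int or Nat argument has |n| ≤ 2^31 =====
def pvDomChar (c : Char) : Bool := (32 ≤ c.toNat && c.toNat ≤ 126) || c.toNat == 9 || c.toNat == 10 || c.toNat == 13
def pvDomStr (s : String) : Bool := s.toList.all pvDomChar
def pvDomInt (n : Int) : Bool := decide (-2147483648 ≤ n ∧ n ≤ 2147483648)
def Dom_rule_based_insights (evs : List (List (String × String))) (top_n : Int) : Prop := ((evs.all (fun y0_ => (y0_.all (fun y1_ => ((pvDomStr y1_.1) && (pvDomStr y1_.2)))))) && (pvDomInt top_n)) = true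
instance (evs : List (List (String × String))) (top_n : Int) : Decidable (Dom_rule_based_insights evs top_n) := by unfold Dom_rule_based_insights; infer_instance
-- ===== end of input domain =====

-- B folds the three rule counters and the per-competitor count into one pass and drops A's
-- unused Counter; same return value (objective: alternative decomposition, no speed claim).

-- shared message builders (pure string data used by both ports)
def msgDrop (n : Int) : List (String × String) :=
  [("lv", "Tirgū novērots cenu kritumu vilnis (" ++ PySem.Int.toStr n ++ " gadījumi) — iespējama akciju fāze vai krājumu optimizācija."),
   ("ru", "Наблюдается волна снижения цен (" ++ PySem.Int.toStr n ++ " случаев) — возможно, началась акция или распродажа остатков."),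
   ("action", "Pārskatīt cenas do 3–5 enkura SKU; pastiprināt komunikāciju par piegādes termiņiem.")]

def msgNew (n : Int) : List (String × String) :=
  [("lv", "Konkurenti izlaiduši " ++ PySem.Int.toStr n ++ " jaunus SKU pēdējās 2 nedēļās."),
   ("ru", "Конкуренты добавили " ++ PySem.Int.toStr n ++ " новых SKU за последние 2 недели."),
   ("action", "Pārvērtēt kategoriju lapas; sasva rēķinu ar pieprasītākajām specifikācijām.")]

def msgAvail (n : Int) : List (String × String) :=
  [("lv", "Biežas pieejamības izmaiņas (" ++ PySem.Int.toStr n ++ ") — loģistikas svārstības tirgū."),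
   ("ru", "Частые изменения наличия (" ++ PySem.Int.toStr n ++ ") — признак логистических колебаний на рынке."),
   ("action", "Komunicēt piegādes laiku; rezervēt krājumus enkura pozīcijām.")]

def msgMost (m : String) : List (String × String) :=
  [("lv", "Aktīvākais konkurents: " ++ m ++ " (vairāk izmaiņu nedēļā)."),
   ("ru", "Самый активный конкурент: " ++ m ++ " (больше всего изменений за неделю)."),
   ("action", "Sekot viņa kampaņām; salīdzināt cenu koridorus.")]

-- e["event"] / e["competitor"]: first-match lookup in the association list (total under Pre_)
def evOf (e : List (String × String)) : String := ((PySem.Dict.mk e).get? "event").getD ""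
def compOf (e : List (String × String)) : String := ((PySem.Dict.mk e).get? "competitor").getD ""

-- ===== PORT A =====
def rule_based_insights (evs : List (List (String × String))) (top_n : Int) : List (List (String × String)) :=
  -- cnt = Counter([e["event"] for e in evs])  (built, never used afterwards)
  let _cnt : PySem.Dict String Int := PySem.Dict.counter (evs.map evOf)
  -- by_comp[e["competitor"]].append(e)
  let by_comp : PySem.Dict String (List (List (String × String))) :=
    evs.foldl (fun d e => d.modify (compOf e) [] (· ++ [e])) PySem.Dict.empty
  let insights : List (List (String × String)) := []
  let drop : Int := evs.foldl (fun n e => if PySem.Str.startswith (evOf e) "PRICE_DOWN" then n + 1 else n) 0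
  let insights := if drop ≥ 3 then insights ++ [msgDrop drop] else insights
  let new_items : Int := evs.foldl (fun n e => if evOf e = "NEW_ITEM" then n + 1 else n) 0
  let insights := if new_items ≥ 3 then insights ++ [msgNew new_items] else insights
  let avail_ch : Int := evs.foldl (fun n e => if evOf e = "AVAIL_CHANGE" then n + 1 else n) 0
  let insights := if avail_ch ≥ 3 then insights ++ [msgAvail avail_ch] else insights
  -- most = max(by_comp.items(), key=lambda kv: len(kv[1]))[0] if by_comp else None; if most: append
  let most : Option String :=
    if by_comp.items = [] then none
    else (PySem.List.max? by_comp.items (fun kv => (kv.2.length : Int))).map (·.1)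
  let insights := match most with
    | some m => if m = "" then insights else insights ++ [msgMost m]
    | none => insights
  PySem.List.slice insights none (some top_n)

-- ===== PORT B =====
def rule_based_insights_alt (evs : List (List (String × String))) (top_n : Int) : List (List (String × String)) :=
  -- one pass: drop / new_items / avail_ch counters plus the comp_counts dict
  let st : Int × Int × Int × PySem.Dict String Int :=
    evs.foldl (fun st e =>
      let ev := evOf e
      let drop := if PySem.Str.startswith ev "PRICE_DOWN" then st.1 + 1 else st.1
      let new_items := if ev = "NEW_ITEM" then st.2.1 + 1 else st.2.1
      let avail_ch := if ev = "AVAIL_CHANGE" then st.2.2.1 + 1 else st.2.2.1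
      let c := compOf e
      (drop, new_items, avail_ch, st.2.2.2.insert c (st.2.2.2.getD c 0 + 1)))
      (0, 0, 0, PySem.Dict.empty)
  let comp_counts := st.2.2.2
  let insights : List (List (String × String)) := []
  let insights := if st.1 ≥ 3 then insights ++ [msgDrop st.1] else insights
  let insights := if st.2.1 ≥ 3 then insights ++ [msgNew st.2.1] else insights
  let insights := if st.2.2.1 ≥ 3 then insights ++ [msgAvail st.2.2.1] else insights
  -- if comp_counts: most, _ = max(comp_counts.items(), key=lambda kv: kv[1]); if most: append
  let insights :=
    if comp_counts.items = [] then insights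
    else match PySem.List.max? comp_counts.items (fun kv => kv.2) with
      | some kv => if kv.1 = "" then insights else insights ++ [msgMost kv.1]
      | none => insights
  PySem.List.slice insights none (some top_n)

-- ===== PRECONDITION & SPEC =====
-- Pre_ excludes exactly the inputs where some event dict lacks an "event" or "competitor"
-- key, on which A raises KeyError.
def Pre_rule_based_insights (evs : List (List (String × String))) (top_n : Int) : Prop :=
  ∀ e ∈ evs, ((PySem.Dict.mk e).get? "event").isSome ∧ ((PySem.Dict.mk e).get? "competitor").isSome
instance (evs : List (List (String × String))) (top_n : Int) : Decidable (Pre_rule_based_insights evs top_n) := by unfold Pre_rule_based_insights; infer_instance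

def pvWitness_rule_based_insights : (List (List (String × String))) × Int :=
  ([[("event", "NEW_ITEM"), ("competitor", "acme")],
    [("event", "PRICE_DOWN"), ("competitor", "acme")]], 5)

def Spec_rule_based_insights (evs : List (List (String × String))) (top_n : Int) (out : List (List (String × String))) : Prop := out = rule_based_insights_alt evs top_n
instance (evs : List (List (String × String))) (top_n : Int) (out : List (List (String × String))) : Decidable (Spec_rule_based_insights evs top_n out) := by unfold Spec_rule_based_insights; infer_instance

-- ===== CLAIM (what is proved, stated in full; the proofs are below) =====
def Claim_equal_rule_based_insights : Prop := ∀ (evs : List (List (String × String))) (top_n : Int), Dom_rule_based_insights evs top_n → Pre_rule_based_insights evs top_n → Spec_rule_based_insights evs top_n (rule_based_insights evs top_n)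

-- ===== LEMMAS AND PROOFS =====

-- the fused fold of B splits into the four independent folds of A
theorem fused_fold_split (evs : List (List (String × String)))
    (a b c : Int) (d : PySem.Dict String Int) :
    evs.foldl (fun st e =>
      let ev := evOf e
      let drop := if PySem.Str.startswith ev "PRICE_DOWN" then st.1 + 1 else st.1
      let new_items := if ev = "NEW_ITEM" then st.2.1 + 1 else st.2.1
      let avail_ch := if ev = "AVAIL_CHANGE" then st.2.2.1 + 1 else st.2.2.1
      let cc := compOf e
      (drop, new_items, avail_ch, st.2.2.2.insert cc (st.2.2.2.getD cc 0 + 1)))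
      (a, b, c, d)
    = (evs.foldl (fun n e => if PySem.Str.startswith (evOf e) "PRICE_DOWN" then n + 1 else n) a,
       evs.foldl (fun n e => if evOf e = "NEW_ITEM" then n + 1 else n) b,
       evs.foldl (fun n e => if evOf e = "AVAIL_CHANGE" then n + 1 else n) c,
       evs.foldl (fun d e => d.insert (compOf e) (d.getD (compOf e) 0 + 1)) d) := by
  induction evs generalizing a b c d with
  | nil => rfl
  | cons e t ih => simp only [List.foldl_cons]; exact ih _ _ _ _

-- first-match lookup through a key-preserving value map
theorem get?_mk_map_len (l : List (String × List (List (String × String)))) (k : String) :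
    (PySem.Dict.mk (l.map (fun kv => (kv.1, ((kv.2.length : Int)))))).get? k
      = ((PySem.Dict.mk l).get? k).map (fun v => (v.length : Int)) := by
  induction l with
  | nil => rfl
  | cons p t ih =>
      obtain ⟨pk, pv⟩ := p
      simp only [List.map_cons, PySem.Dict.get?_mk_cons]
      by_cases h : pk == k
      · simp [h]
      · simp [h, ih]

-- the count dict of B mirrors the grouping dict of A item-for-item (values replaced by lengths)
theorem counts_items_eq (evs : List (List (String × String)))
    (A : PySem.Dict String (List (List (String × String)))) (B : PySem.Dict String Int)
    (h : B.items = A.items.map (fun kv => (kv.1, (kv.2.length : Int)))) :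
    (evs.foldl (fun d e => d.insert (compOf e) (d.getD (compOf e) 0 + 1)) B).items
      = ((evs.foldl (fun d e => d.modify (compOf e) [] (· ++ [e])) A).items).map
          (fun kv => (kv.1, (kv.2.length : Int))) := by
  induction evs generalizing A B with
  | nil => exact h
  | cons e t ih =>
      simp only [List.foldl_cons]
      apply ih
      -- one step preserves the item-for-item relation
      have hB : B = PySem.Dict.mk (A.items.map (fun kv => (kv.1, (kv.2.length : Int)))) :=
        PySem.Dict.ext h
      have hget : ∀ k, B.get? k = (A.get? k).map (fun v => (v.length : Int)) := by
        intro k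
        calc B.get? k = (PySem.Dict.mk (A.items.map (fun kv => (kv.1, (kv.2.length : Int))))).get? k := by rw [hB]
          _ = ((PySem.Dict.mk A.items).get? k).map (fun v => (v.length : Int)) := get?_mk_map_len _ _
          _ = (A.get? k).map (fun v => (v.length : Int)) := rfl
      have hgetD : B.getD (compOf e) 0 = ((A.getD (compOf e) []).length : Int) := by
        rw [PySem.Dict.getD_eq_get?_getD, PySem.Dict.getD_eq_get?_getD, hget]
        cases A.get? (compOf e) <;> rfl
      have hcont : B.contains (compOf e) = A.contains (compOf e) := by
        rw [PySem.Dict.contains_eq_isSome_get?, PySem.Dict.contains_eq_isSome_get?, hget]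
        cases A.get? (compOf e) <;> rfl
      have hmod : A.modify (compOf e) [] (· ++ [e]) = A.insert (compOf e) (A.getD (compOf e) [] ++ [e]) := rfl
      rw [hmod, PySem.Dict.items_insert, PySem.Dict.items_insert, hcont]
      by_cases hc : A.contains (compOf e) = true
      · simp only [hc, if_true, h, hgetD, List.map_map]
        apply List.map_congr_left
        intro p _
        by_cases hp : p.1 == compOf e <;> simp [hp, Function.comp]
      · have hc' : A.contains (compOf e) = false := by simpa using hc
        have hAD : A.getD (compOf e) [] = [] := by
          rw [PySem.Dict.getD_eq_get?_getD]
          have : A.get? (compOf e) = none := by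
            rw [PySem.Dict.contains_eq_isSome_get?] at hc'
            cases hA : A.get? (compOf e) <;> simp [hA] at hc' ⊢
          simp [this]
        simp only [hc', Bool.false_eq_true, if_false, h, hgetD, hAD, List.map_append]
        simp

-- max? steps from a two-element head to a one-element head
theorem max?_cons_cons {α : Type} (key : α → Int) (a b : α) (t : List α) :
    PySem.List.max? (a :: b :: t) key = PySem.List.max? ((if key a < key b then b else a) :: t) key := by
  by_cases h : key a < key b <;> simp [PySem.List.max?, h]

-- max? through a key-preserving value map, head generalized
theorem max?_map_gen (t : List (String × List (List (String × String)))) :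
    ∀ x, PySem.List.max? ((x :: t).map (fun kv => (kv.1, (kv.2.length : Int)))) (fun kv => kv.2)
      = (PySem.List.max? (x :: t) (fun kv => (kv.2.length : Int))).map (fun kv => (kv.1, (kv.2.length : Int))) := by
  induction t with
  | nil => intro x; rfl
  | cons y t' ih =>
      intro x
      simp only [List.map_cons]
      rw [max?_cons_cons (fun kv : String × Int => kv.2), max?_cons_cons (fun kv : String × List (List (String × String)) => (kv.2.length : Int))]
      by_cases h : (x.2.length : Int) < (y.2.length : Int)
      · have e1 : (if (fun (kv : String × Int) => kv.2) ((fun kv => (kv.1, (kv.2.length : Int))) x)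
              < (fun (kv : String × Int) => kv.2) ((fun kv => (kv.1, (kv.2.length : Int))) y)
            then (fun kv => (kv.1, (kv.2.length : Int))) y else (fun kv => (kv.1, (kv.2.length : Int))) x)
            = (fun kv => (kv.1, (kv.2.length : Int))) y := by simp [h]
        have e2 : (if (fun (kv : String × List (List (String × String))) => (kv.2.length : Int)) x
              < (fun (kv : String × List (List (String × String))) => (kv.2.length : Int)) y
            then y else x) = y := by simp [h]
        rw [e1, e2]
        simpa using ih y
      · have e1 : (if (fun (kv : String × Int) => kv.2) ((fun kv => (kv.1, (kv.2.length : Int))) x)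
              < (fun (kv : String × Int) => kv.2) ((fun kv => (kv.1, (kv.2.length : Int))) y)
            then (fun kv => (kv.1, (kv.2.length : Int))) y else (fun kv => (kv.1, (kv.2.length : Int))) x)
            = (fun kv => (kv.1, (kv.2.length : Int))) x := by simp [h]
        have e2 : (if (fun (kv : String × List (List (String × String))) => (kv.2.length : Int)) x
              < (fun (kv : String × List (List (String × String))) => (kv.2.length : Int)) y
            then y else x) = x := by simp [h]
        rw [e1, e2]
        simpa using ih x

-- max? through a key-preserving value map
theorem max?_map (l : List (String × List (List (String × String)))) :
    PySem.List.max? (l.map (fun kv => (kv.1, (kv.2.length : Int)))) (fun kv => kv.2)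
      = (PySem.List.max? l (fun kv => (kv.2.length : Int))).map (fun kv => (kv.1, (kv.2.length : Int))) := by
  cases l with
  | nil => rfl
  | cons x t => exact max?_map_gen t x

-- ===== VERDICT (by name: the statement is the Claim_ definition above) =====
theorem rule_based_insights_spec : Claim_equal_rule_based_insights := by
  intro evs top_n _ _
  unfold Spec_rule_based_insights rule_based_insights rule_based_insights_alt
  rw [fused_fold_split]
  have hitems := counts_items_eq evs PySem.Dict.empty PySem.Dict.empty rfl
  simp only [hitems, max?_map, List.map_eq_nil_iff]
  cases hm : PySem.List.max? (evs.foldl (fun d e => d.modify (compOf e) [] (· ++ [e])) PySem.Dict.empty).items (fun kv => (kv.2.length : Int)) with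
  | none =>
      have h0 : (evs.foldl (fun d e => d.modify (compOf e) [] (· ++ [e])) PySem.Dict.empty).items = [] :=
        (PySem.List.max?_eq_none_iff _ _).mp hm
      simp [h0]
  | some v =>
      have h0 : (evs.foldl (fun d e => d.modify (compOf e) [] (· ++ [e])) PySem.Dict.empty).items ≠ [] := by
        intro h
        rw [h] at hm
        simp [PySem.List.max?] at hm
      simp [h0]
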